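-- pv_equiv track=rewrite | github.com/beylouni/runnit-v0 | smartwatch-analytics/core/metrics_engine.py | _time_in_hr_zones
-- ===== SOURCE A (Python) =====
-- from typing import Dict, List, Any, Optional, Tuple
--
-- def _time_in_hr_zones(hr_values: List[int]) -> Dict[str, int]:
--     """Tempo gasto em cada zona (assumindo 1 record/segundo)"""
--     max_hr = max(hr_values) if hr_values else 180
--
--     zone_times = {
--         'zone1_seconds': 0,
--         'zone2_seconds': 0,
--         'zone3_seconds': 0,
--         'zone4_seconds': 0,
--         'zone5_seconds': 0,
--     }
--
--     for hr in hr_values: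
--         if hr < 0.6 * max_hr:
--             zone_times['zone1_seconds'] += 1
--         elif hr < 0.7 * max_hr:
--             zone_times['zone2_seconds'] += 1
--         elif hr < 0.8 * max_hr:
--             zone_times['zone3_seconds'] += 1
--         elif hr < 0.9 * max_hr:
--             zone_times['zone4_seconds'] += 1
--         else:
--             zone_times['zone5_seconds'] += 1
--
--     return zone_times
-- ===== SOURCE B (Python) =====
-- from typing import Dict, List
--
-- def _bisect_left(s, b):
--     lo, hi = 0, len(s)
--     while lo < hi:
--         mid = (lo + hi) // 2
--         if s[mid] < b:
--             lo = mid + 1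
--         else:
--             hi = mid
--     return lo
--
-- def _time_in_hr_zones(hr_values: List[int]) -> Dict[str, int]:
--     """Tempo gasto em cada zona (assumindo 1 record/segundo)"""
--     max_hr = max(hr_values) if hr_values else 180
--     s = sorted(hr_values)
--     p1 = _bisect_left(s, 0.6 * max_hr)
--     p2 = _bisect_left(s, 0.7 * max_hr)
--     p3 = _bisect_left(s, 0.8 * max_hr)
--     p4 = _bisect_left(s, 0.9 * max_hr)
--     return {
--         'zone1_seconds': p1,
--         'zone2_seconds': p2 - p1,
--         'zone3_seconds': p3 - p2,
--         'zone4_seconds': p4 - p3,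
--         'zone5_seconds': len(s) - p4,
--     }
-- ===== Notes on version B (the rewrite author's own statement) =====
-- stated objective: alternative
-- what changed: A classifies each heart-rate sample with an if/elif chain and increments a dict entry per sample; B sorts the list once and finds the four zone-boundary cut positions by hand-rolled binary search (bisect_left), deriving every zone count as a difference of cumulative cuts.
import Mathlib
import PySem

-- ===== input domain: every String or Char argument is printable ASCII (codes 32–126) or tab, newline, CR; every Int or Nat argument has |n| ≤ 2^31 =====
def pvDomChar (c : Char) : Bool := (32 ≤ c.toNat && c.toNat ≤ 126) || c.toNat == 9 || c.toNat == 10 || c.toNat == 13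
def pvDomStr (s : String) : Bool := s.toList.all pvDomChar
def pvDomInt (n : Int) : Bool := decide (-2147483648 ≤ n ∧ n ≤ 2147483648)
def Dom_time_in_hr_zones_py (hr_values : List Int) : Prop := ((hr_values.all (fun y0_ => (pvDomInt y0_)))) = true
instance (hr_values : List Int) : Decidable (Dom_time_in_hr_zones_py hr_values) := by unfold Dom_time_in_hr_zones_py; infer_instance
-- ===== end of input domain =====

-- B replaces A's per-element if/elif dict-increment loop by sort + hand-rolled binary search for the four
-- zone boundaries (cumulative cut positions, then differences); alternative algorithm, not claimed faster.
-- Float note (both ports): every compared hr satisfies hr ≤ max_hr with |max_hr| ≤ 2^31, where CPython's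
-- 'hr < 0.6*max_hr' (0.7/0.8/0.9 alike) agrees exactly with the integer test '10*hr < 6*max_hr'; the ports
-- use the integer form, exact on Dom.

-- ===== PORT A =====
-- the body of A's 'for hr in hr_values' loop (if/elif chain incrementing one dict entry)
def zoneStepA (max_hr : Int) (d : PySem.Dict String Int) (hr : Int) : PySem.Dict String Int :=
  if 10 * hr < 6 * max_hr then d.modify "zone1_seconds" 0 (· + 1)
  else if 10 * hr < 7 * max_hr then d.modify "zone2_seconds" 0 (· + 1)
  else if 10 * hr < 8 * max_hr then d.modify "zone3_seconds" 0 (· + 1)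
  else if 10 * hr < 9 * max_hr then d.modify "zone4_seconds" 0 (· + 1)
  else d.modify "zone5_seconds" 0 (· + 1)

def time_in_hr_zones_py (hr_values : List Int) : List (String × Int) :=
  -- max_hr = max(hr_values) if hr_values else 180
  let max_hr : Int := match PySem.List.max? hr_values (fun x => x) with
    | some m => m
    | none => 180
  let zone_times : PySem.Dict String Int := PySem.Dict.mk
    [("zone1_seconds", 0), ("zone2_seconds", 0), ("zone3_seconds", 0),
     ("zone4_seconds", 0), ("zone5_seconds", 0)]
  (hr_values.foldl (zoneStepA max_hr) zone_times).items

-- ===== PORT B =====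
-- Source B's hand-rolled _bisect_left(s, b) with b = (c/10)*max_hr passed scaled by 10 (b10 = c*max_hr,
-- comparison 's[mid] < b' becomes '10*s[mid] < b10' — exact, see the float note above).
-- 'mid' is in range whenever lo < hi ≤ len s, so 'getD mid 0' is exactly Python's s[mid] here.
-- The 'while lo < hi' loop is kernel-reducible structural recursion on a fuel that bounds hi - lo
-- (each iteration shrinks hi - lo by at least 1, so fuel = len s never runs out).
def bisectLoop (s : List Int) (b10 : Int) : Nat → Nat → Nat → Nat
  | 0, lo, _ => lo
  | fuel + 1, lo, hi =>
    if lo < hi then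
      if 10 * s.getD ((lo + hi) / 2) 0 < b10 then bisectLoop s b10 fuel ((lo + hi) / 2 + 1) hi
      else bisectLoop s b10 fuel lo ((lo + hi) / 2)
    else lo

def bisectLeftTenths (s : List Int) (b10 : Int) : Nat :=
  bisectLoop s b10 s.length 0 s.length

def time_in_hr_zones_py_alt (hr_values : List Int) : List (String × Int) :=
  let max_hr : Int := match PySem.List.max? hr_values (fun x => x) with
    | some m => m
    | none => 180
  let s := PySem.List.sorted hr_values (fun x => x)
  let p1 := bisectLeftTenths s (6 * max_hr)
  let p2 := bisectLeftTenths s (7 * max_hr)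
  let p3 := bisectLeftTenths s (8 * max_hr)
  let p4 := bisectLeftTenths s (9 * max_hr)
  [("zone1_seconds", (p1 : Int)),
   ("zone2_seconds", (p2 : Int) - (p1 : Int)),
   ("zone3_seconds", (p3 : Int) - (p2 : Int)),
   ("zone4_seconds", (p4 : Int) - (p3 : Int)),
   ("zone5_seconds", (s.length : Int) - (p4 : Int))]

-- ===== PRECONDITION & SPEC =====
def Spec_time_in_hr_zones_py (hr_values : List Int) (out : List (String × Int)) : Prop := out = time_in_hr_zones_py_alt hr_values
instance (hr_values : List Int) (out : List (String × Int)) : Decidable (Spec_time_in_hr_zones_py hr_values out) := by unfold Spec_time_in_hr_zones_py; infer_instance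

-- ===== CLAIM (what is proved, stated in full; the proofs are below) =====
def Claim_equal_time_in_hr_zones_py : Prop := ∀ (hr_values : List Int), Dom_time_in_hr_zones_py hr_values → Spec_time_in_hr_zones_py hr_values (time_in_hr_zones_py hr_values)

-- ===== LEMMAS AND PROOFS =====

-- abbreviation used throughout: the (scaled-integer) zone test
def pBz (b10 x : Int) : Bool := decide (10 * x < b10)

-- countP splits along a pointwise implication between two tests
lemma countP_split (l : List Int) (p q : Int → Bool) (h : ∀ x ∈ l, p x → q x) :
    l.countP q = l.countP p + l.countP (fun x => !p x && q x) := by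
  induction l with
  | nil => simp
  | cons x t ih =>
    simp only [List.countP_cons]
    have hx := h x (by simp)
    have ih' := ih (fun y hy => h y (by simp [hy]))
    by_cases hp : p x = true <;> by_cases hq : q x = true <;> simp_all <;> omega

-- the cut point on a sorted list: the zone test holds exactly on the first countP positions
lemma sorted_countP_char (s : List Int) (b10 : Int) (hs : s.Pairwise (· ≤ ·)) :
    ∀ i (hi : i < s.length), (pBz b10 s[i] = true ↔ i < s.countP (pBz b10)) := by
  intro i hi
  have hsplit := List.takeWhile_append_dropWhile (p := pBz b10) (l := s)
  set t := s.takeWhile (pBz b10) with ht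
  set d := s.dropWhile (pBz b10) with hd
  have htall : ∀ x ∈ t, pBz b10 x = true := fun x hx => List.mem_takeWhile_imp hx
  have hdall : ∀ x ∈ d, pBz b10 x = false := by
    intro x hx
    cases hdc : d with
    | nil => rw [hdc] at hx; simp at hx
    | cons y ys =>
      have hy : pBz b10 y = false := by
        have := List.head?_dropWhile_not (pBz b10) s
        rw [← hd, hdc] at this; simpa using this
      rw [hdc] at hx
      rcases List.mem_cons.mp hx with rfl | hxs
      · exact hy
      · have hpd : d.Pairwise (· ≤ ·) := hs.sublist (List.dropWhile_sublist _)
        have hyx : y ≤ x := by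
          rw [hdc] at hpd
          exact (List.pairwise_cons.mp hpd).1 x hxs
        simp only [pBz, decide_eq_false_iff_not, not_lt] at hy ⊢
        omega
  have hcnt : s.countP (pBz b10) = t.length := by
    conv_lhs => rw [← hsplit]
    rw [List.countP_append, List.countP_eq_length.mpr htall,
        List.countP_eq_zero.mpr (by intro a ha; simpa using hdall a ha)]
    simp
  rw [hcnt]
  constructor
  · intro hp
    by_contra hlt
    push Not at hlt
    have hii : i - t.length < d.length := by
      have := List.length_append (as := t) (bs := d)
      rw [hsplit] at this; omega
    have : s[i] = d[i - t.length] := by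
      rw [List.getElem_of_eq hsplit.symm hi, List.getElem_append_right (by omega)]
    rw [this] at hp
    have := hdall _ (List.getElem_mem hii)
    simp [this] at hp
  · intro hlt
    have : s[i] = t[i]'(hlt) := by
      rw [List.getElem_of_eq hsplit.symm hi, List.getElem_append_left]
    rw [this]
    exact htall _ (List.getElem_mem hlt)

-- the binary search homes in on the cut point
lemma bisect_go (s : List Int) (b10 : Int) (r : Nat)
    (hchar : ∀ i (hi : i < s.length), (pBz b10 s[i] = true ↔ i < r)) :
    ∀ n lo hi, hi - lo ≤ n → lo ≤ r → r ≤ hi → hi ≤ s.length →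
      bisectLoop s b10 n lo hi = r := by
  intro n
  induction n with
  | zero =>
    intro lo hi h1 h2 h3 h4
    rw [bisectLoop]
    omega
  | succ n ih =>
    intro lo hi h1 h2 h3 h4
    rw [bisectLoop]
    by_cases hlh : lo < hi
    · rw [if_pos hlh]
      have hmid : (lo + hi) / 2 < s.length := by omega
      have hgd : s.getD ((lo + hi) / 2) 0 = s[(lo + hi) / 2] := List.getD_eq_getElem s 0 hmid
      by_cases hp : 10 * s.getD ((lo + hi) / 2) 0 < b10
      · rw [if_pos hp]
        have : (lo + hi) / 2 < r := by
          apply (hchar _ hmid).mp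
          simp only [pBz, decide_eq_true_eq]
          rw [← hgd]; exact hp
        exact ih _ _ (by omega) (by omega) h3 h4
      · rw [if_neg hp]
        have : r ≤ (lo + hi) / 2 := by
          by_contra hc
          push Not at hc
          have := (hchar _ hmid).mpr hc
          simp only [pBz, decide_eq_true_eq] at this
          rw [← hgd] at this
          exact hp this
        exact ih _ _ (by omega) h2 this (by omega)
    · rw [if_neg hlh]; omega

lemma bisect_eq_countP (s : List Int) (b10 : Int) (hs : s.Pairwise (· ≤ ·)) :
    bisectLeftTenths s b10 = s.countP (pBz b10) := by
  rw [bisectLeftTenths]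
  have hle : s.countP (pBz b10) ≤ s.length := List.countP_le_length
  exact bisect_go s b10 _ (sorted_countP_char s b10 hs) s.length 0 s.length (by omega) (by omega)
    hle le_rfl

-- A's loop with a general accumulator: each dict entry counts its chain predicate
lemma loopA (m : Int) (l : List Int) : ∀ (c1 c2 c3 c4 c5 : Int),
    l.foldl (zoneStepA m) (PySem.Dict.mk
      [("zone1_seconds", c1), ("zone2_seconds", c2), ("zone3_seconds", c3),
       ("zone4_seconds", c4), ("zone5_seconds", c5)]) =
    PySem.Dict.mk
      [("zone1_seconds", c1 + l.countP (pBz (6*m))),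
       ("zone2_seconds", c2 + l.countP (fun x => !pBz (6*m) x && pBz (7*m) x)),
       ("zone3_seconds", c3 + l.countP (fun x => !pBz (6*m) x && !pBz (7*m) x && pBz (8*m) x)),
       ("zone4_seconds", c4 + l.countP (fun x => !pBz (6*m) x && !pBz (7*m) x && !pBz (8*m) x && pBz (9*m) x)),
       ("zone5_seconds", c5 + l.countP (fun x => !pBz (6*m) x && !pBz (7*m) x && !pBz (8*m) x && !pBz (9*m) x))] := by
  induction l with
  | nil => simp
  | cons x t ih =>
    intro c1 c2 c3 c4 c5
    rw [List.foldl_cons]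
    have hstep : ∀ (d1 d2 d3 d4 d5 : Int), zoneStepA m (PySem.Dict.mk
        [("zone1_seconds", d1), ("zone2_seconds", d2), ("zone3_seconds", d3),
         ("zone4_seconds", d4), ("zone5_seconds", d5)]) x = PySem.Dict.mk
        [("zone1_seconds", d1 + if pBz (6*m) x then 1 else 0),
         ("zone2_seconds", d2 + if !pBz (6*m) x && pBz (7*m) x then 1 else 0),
         ("zone3_seconds", d3 + if !pBz (6*m) x && !pBz (7*m) x && pBz (8*m) x then 1 else 0),
         ("zone4_seconds", d4 + if !pBz (6*m) x && !pBz (7*m) x && !pBz (8*m) x && pBz (9*m) x then 1 else 0),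
         ("zone5_seconds", d5 + if !pBz (6*m) x && !pBz (7*m) x && !pBz (8*m) x && !pBz (9*m) x then 1 else 0)] := by
      intro d1 d2 d3 d4 d5
      simp only [zoneStepA]
      by_cases h6 : 10 * x < 6 * m <;> by_cases h7 : 10 * x < 7 * m <;>
        by_cases h8 : 10 * x < 8 * m <;> by_cases h9 : 10 * x < 9 * m <;>
        simp [h6, h7, h8, h9, pBz, PySem.Dict.modify, PySem.Dict.contains,
          PySem.Dict.insert, PySem.Dict.getD, PySem.Dict.get?]
    rw [hstep, ih]
    simp only [List.countP_cons, PySem.Dict.mk.injEq, List.cons.injEq, Prod.mk.injEq]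
    refine ⟨⟨trivial, ?_⟩, ⟨trivial, ?_⟩, ⟨trivial, ?_⟩, ⟨trivial, ?_⟩, ⟨trivial, ?_⟩, trivial⟩ <;>
      · push_cast
        split <;> ring

-- max(xs) exists on a non-empty list
lemma max?_aux {α κ : Type} [LT κ] [DecidableLT κ] (key : α → κ) (t : List α) : ∀ (a : α),
    t.foldl (fun acc x => match acc with
      | none => some x
      | some m => if key m < key x then some x else some m) (some a) ≠ none := by
  induction t with
  | nil => intro a; simp
  | cons y ys ih =>
    intro a
    simp only [List.foldl_cons]
    by_cases h : key a < key y <;> simp [h] <;> apply ih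

lemma max?_eq_none_iff (xs : List Int) : PySem.List.max? xs (fun x => x) = none ↔ xs = [] := by
  cases xs with
  | nil => simp [PySem.List.max?]
  | cons a t =>
    simp only [PySem.List.max?]
    constructor
    · intro h
      rw [List.foldl_cons] at h
      exact absurd h (max?_aux (fun x => x) t a)
    · intro h; exact absurd h (by simp)

-- successive boundary tests are nested on values not exceeding the max
lemma pBz_mono (m x : Int) (hx : x ≤ m) (c c' : Int) (hcc : c ≤ c') (hc' : c' ≤ 9) :
    pBz (c * m) x = true → pBz (c' * m) x = true := by
  simp only [pBz, decide_eq_true_eq]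
  intro h
  rcases le_or_gt 0 m with hm | hm
  · nlinarith
  · nlinarith

-- ===== VERDICT (by name: the statement is the Claim_ definition above) =====
theorem time_in_hr_zones_py_spec : Claim_equal_time_in_hr_zones_py := by
  intro l _hdom
  unfold Spec_time_in_hr_zones_py
  cases hmax : PySem.List.max? l (fun x => x) with
  | none =>
    have hl : l = [] := (max?_eq_none_iff l).mp hmax
    subst hl
    simp only [time_in_hr_zones_py, time_in_hr_zones_py_alt, hmax]
    rw [show PySem.List.sorted ([] : List Int) (fun x => x) = [] from rfl]
    simp [bisectLeftTenths, bisectLoop]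
  | some m =>
    have hub : ∀ y ∈ l, y ≤ m := fun y hy => PySem.List.max?_isMax hmax y hy
    simp only [time_in_hr_zones_py, time_in_hr_zones_py_alt, hmax]
    set s := PySem.List.sorted l (fun x => x) with hsdef
    have hperm : s.Perm l := PySem.List.sorted_perm l (fun x => x) false
    have hs : s.Pairwise (· ≤ ·) := PySem.List.sorted_pairwise l (fun x => x)
    have hlen : s.length = l.length := hperm.length_eq
    have hcntP : ∀ K : Int, s.countP (pBz K) = l.countP (pBz K) := fun K => hperm.countP_eq _
    rw [loopA m l 0 0 0 0 0,
        bisect_eq_countP s (6*m) hs, bisect_eq_countP s (7*m) hs,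
        bisect_eq_countP s (8*m) hs, bisect_eq_countP s (9*m) hs,
        hcntP, hcntP, hcntP, hcntP, hlen]
    have h67 : ∀ x ∈ l, pBz (6*m) x → pBz (7*m) x :=
      fun x hx => pBz_mono m x (hub x hx) 6 7 (by norm_num) (by norm_num)
    have h78 : ∀ x ∈ l, pBz (7*m) x → pBz (8*m) x :=
      fun x hx => pBz_mono m x (hub x hx) 7 8 (by norm_num) (by norm_num)
    have h89 : ∀ x ∈ l, pBz (8*m) x → pBz (9*m) x :=
      fun x hx => pBz_mono m x (hub x hx) 8 9 (by norm_num) (by norm_num)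
    have e7 := countP_split l (pBz (6*m)) (pBz (7*m)) h67
    have e8 := countP_split l (pBz (7*m)) (pBz (8*m)) h78
    have e9 := countP_split l (pBz (8*m)) (pBz (9*m)) h89
    have c3eq : l.countP (fun x => !pBz (6*m) x && !pBz (7*m) x && pBz (8*m) x)
        = l.countP (fun x => !pBz (7*m) x && pBz (8*m) x) := by
      apply List.countP_congr
      intro x hx
      have hxm : x ≤ m := hub x hx
      by_cases h7 : 10*x < 7*m
      · simp [pBz, h7]
      · have h6 : ¬(10*x < 6*m) := by omega
        simp [pBz, h6, h7]
    have c4eq : l.countP (fun x => !pBz (6*m) x && !pBz (7*m) x && !pBz (8*m) x && pBz (9*m) x)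
        = l.countP (fun x => !pBz (8*m) x && pBz (9*m) x) := by
      apply List.countP_congr
      intro x hx
      have hxm : x ≤ m := hub x hx
      by_cases h8 : 10*x < 8*m
      · simp [pBz, h8]
      · have h7 : ¬(10*x < 7*m) := by omega
        have h6 : ¬(10*x < 6*m) := by omega
        simp [pBz, h6, h7, h8]
    have c5eq : l.countP (fun x => !pBz (6*m) x && !pBz (7*m) x && !pBz (8*m) x && !pBz (9*m) x)
        = l.countP (fun x => !pBz (9*m) x) := by
      apply List.countP_congr
      intro x hx
      have hxm : x ≤ m := hub x hx
      by_cases h9 : 10*x < 9*m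
      · simp [pBz, h9]
      · have h8 : ¬(10*x < 8*m) := by omega
        have h7 : ¬(10*x < 7*m) := by omega
        have h6 : ¬(10*x < 6*m) := by omega
        simp [pBz, h6, h7, h8, h9]
    have hlen9 : l.length = l.countP (pBz (9*m)) + l.countP (fun x => !pBz (9*m) x) := by
      simpa using List.length_eq_countP_add_countP (p := pBz (9*m)) (l := l)
    simp only [c3eq, c4eq, c5eq, List.cons.injEq, Prod.mk.injEq]
    refine ⟨⟨trivial, by omega⟩, ⟨trivial, by omega⟩, ⟨trivial, by omega⟩, ⟨trivial, by omega⟩, ⟨trivial, by omega⟩, trivial⟩
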